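-- pv_equiv track=rewrite | github.com/xiaosihuang003/Collocations-in-Call-of-the-Wild | collocations.py | collect_pair_distances
-- ===== SOURCE A (Python) =====
-- from collections import Counter, defaultdict
-- from typing import List, Tuple, Dict
--
-- def collect_pair_distances(
--     seq: List[Tuple[str, str, str]], window: int
-- ) -> Dict[Tuple[str, str, str], List[int]]:
--     """
--     Slide a symmetric window and collect absolute distances for
--     (ADJ–NOUN) and (NOUN–NOUN) pairs.
--
--     seq is a list of (token, lemma, universal_pos).
--     We use lemmas to define pairs.
--     The pair 'type' is a string "ADJ-NOUN" or "NOUN-NOUN".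
--     """
--     index_by_pos = [i for i, (_, _, pos) in enumerate(seq)]
--     # direct O(n*window) scan
--     dist_map: Dict[Tuple[str, str, str], List[int]] = defaultdict(list)
--
--     n = len(seq)
--     for i in range(n):
--         w1, l1, p1 = seq[i]
--         if p1 not in ("ADJ", "NOUN"):
--             continue
--         j_lo = max(0, i - window)
--         j_hi = min(n, i + window + 1)
--         for j in range(j_lo, j_hi):
--             if j == i:
--                 continue
--             w2, l2, p2 = seq[j]
--             if p2 not in ("ADJ", "NOUN"):
--                 continue
--
--             # keep only the two types we care about
--             if p1 == "ADJ" and p2 == "NOUN":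
--                 key = (l1, l2, "ADJ-NOUN")
--             elif p1 == "NOUN" and p2 == "NOUN":
--                 # order matters a bit less; we store lexicographically to dedup
--                 if l1 <= l2:
--                     key = (l1, l2, "NOUN-NOUN")
--                 else:
--                     key = (l2, l1, "NOUN-NOUN")
--             else:
--                 continue
--
--             dist = abs(j - i)
--             if dist == 0:
--                 continue
--             dist_map[key].append(dist)
--
--     return dist_map
-- ===== SOURCE B (Python) =====
-- def _event(a, b, window):
--     i, l1, p1 = a
--     j, l2, p2 = b
--     if j == i or j < i - window or j > i + window:
--         return None
--     if p1 == "ADJ" and p2 == "NOUN":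
--         return ((l1, l2, "ADJ-NOUN"), abs(j - i))
--     if p1 == "NOUN" and p2 == "NOUN":
--         lo, hi = (l1, l2) if l1 <= l2 else (l2, l1)
--         return ((lo, hi, "NOUN-NOUN"), abs(j - i))
--     return None
--
--
-- def collect_pair_distances(seq, window):
--     # index of relevant positions built once; pairs come from this index,
--     # not from scanning every raw window slot
--     pts = [(i, l, p) for i, (_, l, p) in enumerate(seq) if p in ("ADJ", "NOUN")]
--     events = []
--     for a in pts:
--         for b in pts:
--             e = _event(a, b, window)
--             if e is not None:
--                 events.append(e)
--     out = {}
--     for key, d in events: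
--         out.setdefault(key, []).append(d)
--     return out
-- ===== Notes on version B (the rewrite author's own statement) =====
-- stated objective: alternative
-- what changed: A slides a symmetric raw-index window over the whole sequence and appends into a defaultdict inside the nested scan; B first builds an index of the relevant (ADJ/NOUN) positions once, pairs entries of that index into a flat (key, distance) event list, and groups the events into the dict in a separate final pass.
import Mathlib
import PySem

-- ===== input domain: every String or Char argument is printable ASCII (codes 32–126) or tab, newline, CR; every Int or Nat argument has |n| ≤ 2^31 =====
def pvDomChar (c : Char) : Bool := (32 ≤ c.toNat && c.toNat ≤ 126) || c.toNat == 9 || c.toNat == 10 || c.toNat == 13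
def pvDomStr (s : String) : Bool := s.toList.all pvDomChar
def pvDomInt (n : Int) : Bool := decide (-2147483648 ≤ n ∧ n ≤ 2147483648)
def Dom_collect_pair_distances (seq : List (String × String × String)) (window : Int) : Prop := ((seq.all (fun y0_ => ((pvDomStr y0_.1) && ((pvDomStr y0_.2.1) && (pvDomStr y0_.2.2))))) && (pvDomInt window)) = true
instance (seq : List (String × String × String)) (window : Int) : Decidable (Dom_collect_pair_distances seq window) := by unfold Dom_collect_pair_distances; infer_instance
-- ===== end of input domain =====

-- B replaces the raw O(n·window) index scan by a prebuilt index of the relevant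
-- (ADJ/NOUN) positions and a flat event list grouped at the end (objective: alternative).

-- ===== PORT A =====
-- literal transliteration of A's nested window scan over raw indices into a defaultdict(list)
def collect_pair_distances (seq : List (String × String × String)) (window : Int) :
    List (String × String × String × List Int) :=
  let _index_by_pos := (PySem.List.enumerate seq 0).map (fun p => p.1)  -- computed and unused, as in A
  let n : Int := seq.length
  let dist_map :=
    (PySem.List.pyRange 0 n 1).foldl (fun dm i =>
      let t1 := PySem.List.pyGetD seq i ("", "", "")
      if ¬ (t1.2.2 = "ADJ" ∨ t1.2.2 = "NOUN") then dm
      else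
        let j_lo := max 0 (i - window)
        let j_hi := min n (i + window + 1)
        (PySem.List.pyRange j_lo j_hi 1).foldl (fun dm j =>
          if j = i then dm
          else
            let t2 := PySem.List.pyGetD seq j ("", "", "")
            if ¬ (t2.2.2 = "ADJ" ∨ t2.2.2 = "NOUN") then dm
            else
              let key? : Option (String × String × String) :=
                if t1.2.2 = "ADJ" ∧ t2.2.2 = "NOUN" then some (t1.2.1, t2.2.1, "ADJ-NOUN")
                else if t1.2.2 = "NOUN" ∧ t2.2.2 = "NOUN" then
                  (if t1.2.1 ≤ t2.2.1 then some (t1.2.1, t2.2.1, "NOUN-NOUN")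
                   else some (t2.2.1, t1.2.1, "NOUN-NOUN"))
                else none
              match key? with
              | none => dm
              | some key =>
                let dist := |j - i|
                if dist = 0 then dm
                else dm.modify key [] (· ++ [dist])) dm)  -- defaultdict(list) append
      (PySem.Dict.empty : PySem.Dict (String × String × String) (List Int))
  dist_map.items.map (fun p => (p.1.1, p.1.2.1, p.1.2.2, p.2))  -- flatten (key, value) per the tuple convention

-- ===== PORT B =====
-- B-side helper: the event (key, distance) of a pair of relevant positions, or none
def pvEvent (a b : Int × String × String) (window : Int) :
    Option ((String × String × String) × Int) :=
  if b.1 = a.1 ∨ b.1 < a.1 - window ∨ b.1 > a.1 + window then none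
  else if a.2.2 = "ADJ" ∧ b.2.2 = "NOUN" then some ((a.2.1, b.2.1, "ADJ-NOUN"), |b.1 - a.1|)
  else if a.2.2 = "NOUN" ∧ b.2.2 = "NOUN" then
    (if a.2.1 ≤ b.2.1 then some ((a.2.1, b.2.1, "NOUN-NOUN"), |b.1 - a.1|)
     else some ((b.2.1, a.2.1, "NOUN-NOUN"), |b.1 - a.1|))
  else none

-- literal transliteration of Source B: relevant-position index, flat event list, grouping pass
-- (out.setdefault(key, []).append(d) is ported as its exact effect, modify key [] (· ++ [d]))
def collect_pair_distances_alt (seq : List (String × String × String)) (window : Int) :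
    List (String × String × String × List Int) :=
  let pts := (PySem.List.enumerate seq 0).filterMap (fun e =>
    if e.2.2.2 = "ADJ" ∨ e.2.2.2 = "NOUN" then some (e.1, e.2.2.1, e.2.2.2) else none)
  let events := pts.flatMap (fun a => pts.filterMap (fun b => pvEvent a b window))
  (events.foldl (fun d e => d.modify e.1 [] (· ++ [e.2]))
    (PySem.Dict.empty : PySem.Dict (String × String × String) (List Int))).items.map
    (fun p => (p.1.1, p.1.2.1, p.1.2.2, p.2))  -- flatten (key, value) per the tuple convention

-- ===== PRECONDITION & SPEC =====
def Spec_collect_pair_distances (seq : List (String × String × String)) (window : Int) (out : List (String × String × String × List Int)) : Prop := out = collect_pair_distances_alt seq window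
instance (seq : List (String × String × String)) (window : Int) (out : List (String × String × String × List Int)) : Decidable (Spec_collect_pair_distances seq window out) := by unfold Spec_collect_pair_distances; infer_instance

-- ===== CLAIM (what is proved, stated in full; the proofs are below) =====
def Claim_equal_collect_pair_distances : Prop := ∀ (seq : List (String × String × String)) (window : Int), Dom_collect_pair_distances seq window → Spec_collect_pair_distances seq window (collect_pair_distances seq window)

-- ===== LEMMAS AND PROOFS =====

-- A's inner-loop body, read as an optional event per raw index j
def pvEvA (seq : List (String × String × String)) (i j : Int) :
    Option ((String × String × String) × Int) :=
  let t1 := PySem.List.pyGetD seq i ("", "", "")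
  if j = i then none
  else
    let t2 := PySem.List.pyGetD seq j ("", "", "")
    if ¬ (t2.2.2 = "ADJ" ∨ t2.2.2 = "NOUN") then none
    else
      let key? : Option (String × String × String) :=
        if t1.2.2 = "ADJ" ∧ t2.2.2 = "NOUN" then some (t1.2.1, t2.2.1, "ADJ-NOUN")
        else if t1.2.2 = "NOUN" ∧ t2.2.2 = "NOUN" then
          (if t1.2.1 ≤ t2.2.1 then some (t1.2.1, t2.2.1, "NOUN-NOUN")
           else some (t2.2.1, t1.2.1, "NOUN-NOUN"))
        else none
      match key? with
      | none => none
      | some key => let dist := |j - i|; if dist = 0 then none else some (key, dist)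

-- a fold that skips none-events is the fold over the filterMap
lemma pv_foldl_opt {α β γ : Type} (l : List α) (ev : α → Option β) (f : γ → β → γ)
    (init : γ) :
    l.foldl (fun d x => match ev x with | none => d | some e => f d e) init
      = (l.filterMap ev).foldl f init := by
  induction l generalizing init with
  | nil => rfl
  | cons x xs ih => cases h : ev x <;> simp [h, ih]

-- the clamped window range is the filter of the whole range by the window condition
lemma pv_pyRange_clamp (n lo hi : Int) :
    PySem.List.pyRange (max 0 lo) (min n (hi + 1)) 1
      = (PySem.List.pyRange 0 n 1).filter (fun j => decide (lo ≤ j ∧ j ≤ hi)) := by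
  apply List.Perm.eq_of_pairwise (le := (· < ·))
  · intro a b _ _ h1 h2; omega
  · exact PySem.List.pairwise_lt_pyRange_one _ _
  · exact (PySem.List.pairwise_lt_pyRange_one _ _).filter _
  · apply (List.perm_ext_iff_of_nodup (PySem.List.nodup_pyRange_one _ _)
      ((PySem.List.nodup_pyRange_one _ _).filter _)).mpr
    intro x
    simp [PySem.List.mem_pyRange_one, List.mem_filter]
    omega

lemma pv_flatMap_filterMap {α β γ : Type} (l : List α) (g : α → Option β) (h : β → List γ) :
    (l.filterMap g).flatMap h
      = l.flatMap (fun x => match g x with | none => [] | some b => h b) := by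
  induction l with
  | nil => rfl
  | cons x xs ih => cases hx : g x <;> simp [hx, ih]

-- B's relevant-position index entry for a raw index
def pvQ (seq : List (String × String × String)) (j : Int) : Option (Int × String × String) :=
  let t := PySem.List.pyGetD seq j ("", "", "")
  if t.2.2 = "ADJ" ∨ t.2.2 = "NOUN" then some (j, t.2.1, t.2.2) else none

-- A's event stream: window range per relevant i, filtered through pvEvA
def pvEventsA (seq : List (String × String × String)) (window : Int) :
    List ((String × String × String) × Int) :=
  (PySem.List.pyRange 0 (seq.length : Int) 1).flatMap (fun i =>
    if ¬ ((PySem.List.pyGetD seq i ("", "", "")).2.2 = "ADJ" ∨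
          (PySem.List.pyGetD seq i ("", "", "")).2.2 = "NOUN") then []
    else (PySem.List.pyRange (max 0 (i - window))
            (min (seq.length : Int) (i + window + 1)) 1).filterMap (pvEvA seq i))

lemma pv_A_eq_fold (seq : List (String × String × String)) (window : Int) :
    collect_pair_distances seq window
      = (((pvEventsA seq window).foldl (fun d e => d.modify e.1 [] (· ++ [e.2]))
          (PySem.Dict.empty : PySem.Dict (String × String × String) (List Int))).items.map
          (fun p => (p.1.1, p.1.2.1, p.1.2.2, p.2))) := by
  unfold collect_pair_distances pvEventsA
  dsimp only
  rw [List.foldl_flatMap]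
  congr 2
  congr 1
  funext dm i
  by_cases h1 : (PySem.List.pyGetD seq i ("", "", "")).2.2 = "ADJ" ∨
      (PySem.List.pyGetD seq i ("", "", "")).2.2 = "NOUN"
  · simp only [h1, not_true_eq_false, if_false, ite_not]
    rw [← pv_foldl_opt]
    congr 1
    funext dm j
    unfold pvEvA
    dsimp only
    by_cases hj : j = i
    · simp [hj]
    · simp only [hj, if_false, ite_not]
      by_cases h2 : (PySem.List.pyGetD seq j ("", "", "")).2.2 = "ADJ" ∨
          (PySem.List.pyGetD seq j ("", "", "")).2.2 = "NOUN"
      · simp only [h2]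
        have habs : ¬(|j - i| = 0) := by rw [abs_eq_zero]; omega
        split_ifs <;> simp
      · simp [h2]
  · simp [h1]

lemma pv_pts_eq (seq : List (String × String × String)) :
    (PySem.List.enumerate seq 0).filterMap (fun e =>
      if e.2.2.2 = "ADJ" ∨ e.2.2.2 = "NOUN" then some (e.1, e.2.2.1, e.2.2.2) else none)
      = (PySem.List.pyRange 0 (seq.length : Int) 1).filterMap (pvQ seq) := by
  rw [PySem.List.enumerate_eq_map_pyRange seq ("", "", ""), List.filterMap_map]
  simp only [pysem]
  rfl

lemma pv_inner_eq (seq : List (String × String × String)) (window i : Int)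
    (a : Int × String × String) (ha : pvQ seq i = some a) :
    (PySem.List.pyRange (max 0 (i - window))
        (min (seq.length : Int) (i + window + 1)) 1).filterMap (pvEvA seq i)
      = ((PySem.List.pyRange 0 (seq.length : Int) 1).filterMap (pvQ seq)).filterMap
          (fun b => pvEvent a b window) := by
  have ha' := ha
  unfold pvQ at ha'
  dsimp only at ha'
  split at ha'
  case isFalse => exact absurd ha' (by simp)
  case isTrue hrel =>
  obtain rfl : a = (i, (PySem.List.pyGetD seq i ("", "", "")).2.1,
      (PySem.List.pyGetD seq i ("", "", "")).2.2) := by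
    injection ha' with h; exact h.symm
  rw [List.filterMap_filterMap]
  rw [show min (seq.length : Int) (i + window + 1)
        = min (seq.length : Int) ((i + window) + 1) from rfl,
      pv_pyRange_clamp (seq.length : Int) (i - window) (i + window),
      List.filterMap_filter]
  apply List.filterMap_congr
  intro j _
  dsimp only
  by_cases h2 : (PySem.List.pyGetD seq j ("", "", "")).2.2 = "ADJ" ∨
      (PySem.List.pyGetD seq j ("", "", "")).2.2 = "NOUN"
  · have hq : pvQ seq j
        = some (j, (PySem.List.pyGetD seq j ("", "", "")).2.1,
            (PySem.List.pyGetD seq j ("", "", "")).2.2) := by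
      unfold pvQ; simp [h2]
    rw [hq]; dsimp only [Option.bind]
    by_cases hw : (i - window ≤ j ∧ j ≤ i + window)
    · by_cases hj : j = i
      · subst hj
        unfold pvEvA pvEvent
        simp [hw]
      · have hc : ¬ (j = i ∨ j < i - window ∨ j > i + window) := by
          simp only [not_or]; exact ⟨hj, by omega, by omega⟩
        have habs : ¬ (|j - i| = 0) := by rw [abs_eq_zero]; omega
        unfold pvEvA pvEvent
        simp only [hw, hj, habs, ite_not]
        split_ifs <;> first | rfl | simp_all
    · have hc : (j = i ∨ j < i - window ∨ j > i + window) := by omega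
      rw [if_neg (by simp only [decide_eq_true_eq]; omega)]
      unfold pvEvent
      dsimp only
      rw [if_pos hc]
  · have hq : pvQ seq j = none := by unfold pvQ; simp [h2]
    rw [hq]; dsimp only [Option.bind]
    unfold pvEvA
    dsimp only
    simp only [h2, not_false_eq_true, if_true]
    split_ifs <;> rfl

lemma pv_events_eq (seq : List (String × String × String)) (window : Int) :
    pvEventsA seq window
      = (((PySem.List.enumerate seq 0).filterMap (fun e =>
            if e.2.2.2 = "ADJ" ∨ e.2.2.2 = "NOUN" then some (e.1, e.2.2.1, e.2.2.2) else none)).flatMap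
          (fun a => ((PySem.List.enumerate seq 0).filterMap (fun e =>
            if e.2.2.2 = "ADJ" ∨ e.2.2.2 = "NOUN" then some (e.1, e.2.2.1, e.2.2.2) else none)).filterMap
            (fun b => pvEvent a b window))) := by
  rw [pv_pts_eq, pv_flatMap_filterMap]
  unfold pvEventsA
  congr 1
  funext i
  cases hq : pvQ seq i with
  | none =>
    have hrel : ¬ ((PySem.List.pyGetD seq i ("", "", "")).2.2 = "ADJ" ∨
        (PySem.List.pyGetD seq i ("", "", "")).2.2 = "NOUN") := by
      intro h; unfold pvQ at hq; simp [h] at hq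
    simp [hrel]
  | some a =>
    have hrel : ((PySem.List.pyGetD seq i ("", "", "")).2.2 = "ADJ" ∨
        (PySem.List.pyGetD seq i ("", "", "")).2.2 = "NOUN") := by
      by_contra h; unfold pvQ at hq; simp [h] at hq
    simp only [hrel, not_true_eq_false, if_false]
    exact pv_inner_eq seq window i a hq

-- ===== VERDICT (by name: the statement is the Claim_ definition above) =====
theorem collect_pair_distances_spec : Claim_equal_collect_pair_distances := by
  intro seq window _
  unfold Spec_collect_pair_distances
  rw [pv_A_eq_fold, pv_events_eq]
  rfl
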